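-- pv_equiv track=rewrite | github.com/DilermandoQueiroz/Cowboy | cowboy.py | reordenacanonica
-- ===== SOURCE A (Python) =====
-- def reordenacanonica(masc1, masc2):
--     '''Faz a reodernação das bases
--     ex: e3^e2 -> -e2^e3
--     '''
--     trocas = 0
--     masc1 = masc1 >> 1
--
--     while masc1 != 0:
--         trocas = trocas + colisoes(masc1 & masc2)
--         masc1 = masc1 >> 1
--     if (trocas & 1) == 0:
--         return 1
--     else:
--         return -1
--
-- def colisoes(mask):
--     mask = mask - ((mask >> 1) & 0x55555555)
--     mask = (mask & 0x33333333) + ((mask >> 2) & 0x33333333)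
--     return (((mask + (mask >> 4) & 0xF0F0F0F) * 0x1010101) & 0xffffffff) >> 24
-- ===== SOURCE B (Python) =====
-- def reordenacanonica(masc1, masc2):
--     '''Faz a reodernação das bases
--     ex: e3^e2 -> -e2^e3
--     '''
--     trocas = 0
--     m2 = masc2 & 0xffffffff  # the 32-bit popcount helper of A only ever sees masc2's low 32 bits
--     j = 0
--     while m2 != 0:
--         if m2 & 1:
--             trocas += (masc1 >> (j + 1)).bit_count()
--         m2 >>= 1
--         j += 1
--     return 1 if trocas & 1 == 0 else -1
-- ===== Notes on version B (the rewrite author's own statement) =====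
-- stated objective: alternative
-- what changed: Instead of A's loop that repeatedly shifts masc1 and popcounts (masc1>>k)&masc2 with a 32-bit SWAR bit-trick helper, B enumerates the set bits j of masc2's low 32 bits once and adds the popcount (int.bit_count) of masc1 >> (j+1), i.e. the count of masc1 bits strictly above j.
import Mathlib
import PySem

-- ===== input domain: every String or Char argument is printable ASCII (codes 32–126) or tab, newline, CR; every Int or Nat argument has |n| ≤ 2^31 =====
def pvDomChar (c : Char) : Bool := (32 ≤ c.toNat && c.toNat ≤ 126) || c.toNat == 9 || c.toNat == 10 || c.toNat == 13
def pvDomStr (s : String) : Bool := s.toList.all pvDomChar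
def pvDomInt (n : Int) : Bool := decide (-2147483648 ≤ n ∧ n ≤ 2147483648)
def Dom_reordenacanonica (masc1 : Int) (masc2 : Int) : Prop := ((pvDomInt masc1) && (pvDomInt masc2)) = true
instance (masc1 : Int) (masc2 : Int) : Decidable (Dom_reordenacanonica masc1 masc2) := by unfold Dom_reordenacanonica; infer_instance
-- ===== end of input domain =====

-- B computes the same swap parity by enumerating masc2's set bits and popcounting masc1's tail,
-- instead of A's shift-masc1 loop with a SWAR popcount helper (objective: alternative decomposition).

-- cast fact the ports' termination arguments use: Int shift of a Nat-cast is the Nat shift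
theorem natCast_shiftRight (n k : Nat) : ((n : Int) >>> k) = ((n >>> k : Nat) : Int) := rfl

-- ===== PORT A =====
def colisoes (mask : Int) : Int :=
  let mask1 := mask - PySem.Int.band (mask >>> (1:Nat)) 0x55555555
  let mask2 := PySem.Int.band mask1 0x33333333 + PySem.Int.band (mask1 >>> (2:Nat)) 0x33333333
  (PySem.Int.band (PySem.Int.band (mask2 + (mask2 >>> (4:Nat))) 0xF0F0F0F * 0x1010101) 0xffffffff) >>> (24:Nat)

-- Python's `while masc1 != 0` loop; for masc1 < 0 it never exits (those inputs are outside Pre_),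
-- so the guard stops on m1 ≤ 0 purely to make the recursion total.
def loopA (m1 : Int) (masc2 : Int) (trocas : Int) : Int :=
  if h : m1 ≤ 0 then trocas
  else loopA (m1 >>> (1:Nat)) masc2 (trocas + colisoes (PySem.Int.band m1 masc2))
termination_by m1.toNat
decreasing_by
  obtain ⟨k, rfl⟩ := Int.eq_ofNat_of_zero_le (by omega : (0:Int) ≤ m1)
  rw [natCast_shiftRight]
  simp only [Int.toNat_natCast, Nat.shiftRight_eq_div_pow, pow_one]
  omega

def reordenacanonica (masc1 : Int) (masc2 : Int) : Int :=
  let trocas := loopA (masc1 >>> (1:Nat)) masc2 0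
  if PySem.Int.band trocas 1 = 0 then 1 else -1

-- ===== PORT B =====
-- Python's `while m2 != 0` loop; m2 starts masked to 32 nonneg bits, the m2 ≤ 0 guard makes it total.
def loopB (masc1 : Int) (m2 : Int) (j : Nat) (trocas : Int) : Int :=
  if h : m2 ≤ 0 then trocas
  else
    loopB masc1 (m2 >>> (1:Nat)) (j + 1)
      (if PySem.Int.band m2 1 ≠ 0
        then trocas + (PySem.Int.bitCount (masc1 >>> (j + 1)) : Int) else trocas)
termination_by m2.toNat
decreasing_by
  obtain ⟨k, rfl⟩ := Int.eq_ofNat_of_zero_le (by omega : (0:Int) ≤ m2)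
  rw [natCast_shiftRight]
  simp only [Int.toNat_natCast, Nat.shiftRight_eq_div_pow, pow_one]
  omega

def reordenacanonica_alt (masc1 : Int) (masc2 : Int) : Int :=
  let trocas := loopB masc1 (PySem.Int.band masc2 0xffffffff) 0 0
  if PySem.Int.band trocas 1 = 0 then 1 else -1

-- ===== PRECONDITION & SPEC =====
-- Pre_ excludes masc1 < 0, on which A's `while masc1 != 0` loop never terminates
-- (masc1 >> 1 stabilises at -1); A returns on every masc1 ≥ 0.
def Pre_reordenacanonica (masc1 : Int) (masc2 : Int) : Prop := 0 ≤ masc1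
instance (masc1 : Int) (masc2 : Int) : Decidable (Pre_reordenacanonica masc1 masc2) := by
  unfold Pre_reordenacanonica; infer_instance
def pvWitness_reordenacanonica : Int × Int := (6, 5)
def Spec_reordenacanonica (masc1 : Int) (masc2 : Int) (out : Int) : Prop := out = reordenacanonica_alt masc1 masc2
instance (masc1 : Int) (masc2 : Int) (out : Int) : Decidable (Spec_reordenacanonica masc1 masc2 out) := by
  unfold Spec_reordenacanonica; infer_instance

-- ===== CLAIM (what is proved, stated in full; the proofs are below) =====
def Claim_equal_reordenacanonica : Prop := ∀ (masc1 : Int) (masc2 : Int), Dom_reordenacanonica masc1 masc2 → Pre_reordenacanonica masc1 masc2 → Spec_reordenacanonica masc1 masc2 (reordenacanonica masc1 masc2)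

-- ===== LEMMAS AND PROOFS =====

-- Nat-level popcount (Python's int.bit_count on nonnegative ints)
def popc (n : Nat) : Nat := PySem.Int.bitCount (n : Int)

theorem popc_zero : popc 0 = 0 := by simp [popc, PySem.Int.bitCount_zero]

theorem popc_rec (y : Nat) : popc y = y % 2 + popc (y / 2) := by
  rcases Nat.eq_zero_or_pos y with h | h
  · subst h; simp [popc_zero]
  · simpa [popc] using PySem.Int.bitCount_natCast h

-- ---- generic bit lemmas ----
theorem testBit_add_high {k : Nat} (x y : Nat) (hx : x < 2^k) (i : Nat) :
    (x + 2^k*y).testBit i = if i < k then x.testBit i else y.testBit (i - k) := by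
  split
  · rename_i h
    have h1 : ((x + 2^k*y) % 2^k).testBit i = (x + 2^k*y).testBit i := by
      rw [Nat.testBit_mod_two_pow]; simp [h]
    have h2 : (x + 2^k*y) % 2^k = x := by
      rw [Nat.add_mul_mod_self_left, Nat.mod_eq_of_lt hx]
    rw [← h1, h2]
  · rename_i h
    have h2 : (x + 2^k*y) / 2^k = y := by
      rw [Nat.add_mul_div_left _ _ (Nat.two_pow_pos k), Nat.div_eq_of_lt hx]; omega
    have h3 := Nat.testBit_div_two_pow (n := k) (x + 2^k*y) (i - k)
    rw [h2] at h3
    rw [h3]; congr 1; omega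

theorem landSplit {k : Nat} (a t m M : Nat) (ha : a < 2^k) (hm : m < 2^k) :
    (a + 2^k*t) &&& (m + 2^k*M) = (a &&& m) + 2^k*(t &&& M) := by
  apply Nat.eq_of_testBit_eq
  intro i
  rw [Nat.testBit_land, testBit_add_high a t ha, testBit_add_high m M hm,
      testBit_add_high (a &&& m) (t &&& M) (lt_of_le_of_lt Nat.and_le_left ha)]
  split <;> simp [Nat.testBit_land]

theorem landMod {k : Nat} (x m : Nat) (hm : m < 2^k) : x &&& m = (x % 2^k) &&& m := by
  apply Nat.eq_of_testBit_eq
  intro i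
  rw [Nat.testBit_land, Nat.testBit_land, Nat.testBit_mod_two_pow]
  by_cases h : i < k
  · simp [h]
  · have hmf : m.testBit i = false :=
      Nat.testBit_eq_false_of_lt (lt_of_lt_of_le hm (Nat.pow_le_pow_right (by norm_num) (by omega)))
    simp [hmf, h]

theorem land_div2 (u v : Nat) : (u &&& v) / 2 = (u / 2) &&& (v / 2) := by
  apply Nat.eq_of_testBit_eq
  intro i
  rw [Nat.testBit_land, ← Nat.testBit_succ, ← Nat.testBit_succ, ← Nat.testBit_succ,
      Nat.testBit_land]

theorem land_mod2 (u v : Nat) : (u &&& v) % 2 = (u % 2) * (v % 2) := by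
  have aux : (u &&& v) &&& 1 = (u &&& 1) &&& (v &&& 1) := by
    apply Nat.eq_of_testBit_eq
    intro i
    simp only [Nat.testBit_land]
    cases u.testBit i <;> cases v.testBit i <;> cases Nat.testBit 1 i <;> rfl
  have e1 := Nat.and_one_is_mod (u &&& v)
  have e2 := Nat.and_one_is_mod u
  have e3 := Nat.and_one_is_mod v
  rw [e1, e2, e3] at aux
  rw [aux]
  rcases Nat.mod_two_eq_zero_or_one u with hu | hu <;>
    rcases Nat.mod_two_eq_zero_or_one v with hv | hv <;> rw [hu, hv] <;> decide

theorem ldiff_div2 (u v : Nat) : (Nat.ldiff u v) / 2 = Nat.ldiff (u / 2) (v / 2) := by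
  apply Nat.eq_of_testBit_eq
  intro i
  rw [Nat.testBit_ldiff, ← Nat.testBit_succ, ← Nat.testBit_succ, ← Nat.testBit_succ,
      Nat.testBit_ldiff]

theorem ldiff_mod2 (u v : Nat) : (Nat.ldiff u v) % 2 = (u % 2) * (1 - v % 2) := by
  have h := Nat.testBit_ldiff u v 0
  rw [Nat.testBit_zero, Nat.testBit_zero, Nat.testBit_zero] at h
  rcases Nat.mod_two_eq_zero_or_one u with hu | hu <;>
    rcases Nat.mod_two_eq_zero_or_one v with hv | hv <;>
      rw [hu, hv] <;> rw [hu, hv] at h <;> norm_num at h ⊢ <;> omega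

theorem ldiff_zero_left (v : Nat) : Nat.ldiff 0 v = 0 := by
  apply Nat.eq_of_testBit_eq
  intro i
  simp [Nat.testBit_ldiff]

theorem land_add_ldiff (u : Nat) : ∀ v, (u &&& v) + Nat.ldiff u v = u := by
  induction u using Nat.strong_induction_on with
  | _ u IH =>
    intro v
    rcases Nat.eq_zero_or_pos u with h0 | h0
    · subst h0; simp [Nat.zero_and, ldiff_zero_left]
    · have hih := IH (u / 2) (by omega) (v / 2)
      have h1 := land_div2 u v
      have h3 := ldiff_div2 u v
      have hb2 : (u &&& v) % 2 + (Nat.ldiff u v) % 2 = u % 2 := by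
        rw [land_mod2, ldiff_mod2]
        rcases Nat.mod_two_eq_zero_or_one u with hu | hu <;>
          rcases Nat.mod_two_eq_zero_or_one v with hv | hv <;> rw [hu, hv] <;> decide
      omega


theorem sub_land (u v : Nat) : u - (u &&& v) = Nat.ldiff u v := by
  have := land_add_ldiff u v
  omega

-- low-32-bit reduction: a Nat below 2^32 ANDed with any Python int only sees its low 32 bits
theorem land_low32 (p n : Nat) (hp : p < 2^32) : p &&& n = p &&& (n &&& 4294967295) := by
  apply Nat.eq_of_testBit_eq
  intro i
  rw [Nat.testBit_land, Nat.testBit_land, Nat.testBit_land]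
  by_cases h : i < 32
  · have : (4294967295 : Nat).testBit i = true := by
      rw [(by norm_num : (4294967295:Nat) = 2^32 - 1), Nat.testBit_two_pow_sub_one]
      simpa using h
    simp [this]
  · have hpf : p.testBit i = false :=
      Nat.testBit_eq_false_of_lt (lt_of_lt_of_le hp (Nat.pow_le_pow_right (by norm_num) (by omega)))
    simp [hpf]

theorem ldiff_low32 (p n : Nat) (hp : p < 2^32) :
    p &&& Nat.ldiff 4294967295 n = Nat.ldiff p n := by
  apply Nat.eq_of_testBit_eq
  intro i
  rw [Nat.testBit_land, Nat.testBit_ldiff, Nat.testBit_ldiff]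
  by_cases h : i < 32
  · have : (4294967295 : Nat).testBit i = true := by
      rw [(by norm_num : (4294967295:Nat) = 2^32 - 1), Nat.testBit_two_pow_sub_one]
      simpa using h
    simp [this]
  · have hpf : p.testBit i = false :=
      Nat.testBit_eq_false_of_lt (lt_of_lt_of_le hp (Nat.pow_le_pow_right (by norm_num) (by omega)))
    simp [hpf]

-- band of a small Nat with ANY Int equals band with the Int's low 32 bits
theorem band32 (b : Int) (p : Nat) (hp : p < 2^32) :
    PySem.Int.band (p : Int) b = ((p &&& (PySem.Int.band b 4294967295).toNat : Nat) : Int) := by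
  rcases le_or_gt 0 b with hb | hb
  · obtain ⟨n, rfl⟩ := Int.eq_ofNat_of_zero_le hb
    have h1 : PySem.Int.band (n : Int) 4294967295 = ((n &&& 4294967295 : Nat) : Int) := by
      exact_mod_cast PySem.Int.band_natCast n 4294967295
    rw [h1]
    rw [PySem.Int.band_natCast p n]
    simp [Int.toNat_natCast]
    exact_mod_cast congrArg (Nat.cast : Nat → Int) (land_low32 p n hp)
  · have hb' : ¬ (0 ≤ b) := by omega
    have e1 : PySem.Int.band (p : Int) b
        = ((p - (p &&& (-b - 1).toNat) : Nat) : Int) := by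
      unfold PySem.Int.band
      rw [if_pos (Int.natCast_nonneg p), if_neg hb', Int.toNat_natCast]
    have e2 : PySem.Int.band b 4294967295
        = ((4294967295 - (4294967295 &&& (-b - 1).toNat) : Nat) : Int) := by
      unfold PySem.Int.band
      rw [if_neg hb', if_pos (by norm_num : (0:Int) ≤ 4294967295)]
      rfl
    rw [e1, e2]
    set n := (-b - 1).toNat with hn
    rw [Int.toNat_natCast]
    rw [sub_land p n, sub_land 4294967295 n, ldiff_low32 p n hp]

-- ---- the SWAR popcount pipeline of `colisoes`, on Nat, with / for shifts ----
def r1 (v : Nat) : Nat := v - ((v / 2) &&& 0x55)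
def r2 (v : Nat) : Nat := (v &&& 0x33) + ((v / 4) &&& 0x33)
def r3 (v : Nat) : Nat := (v + v / 16) &&& 0x0F
def Bt (v : Nat) : Nat := r3 (r2 (r1 v))

def q1 (w : Nat) : Nat := w - ((w / 2) &&& 0x5555)
def q2 (w : Nat) : Nat := (w &&& 0x3333) + ((w / 4) &&& 0x3333)
def q3 (w : Nat) : Nat := (w + w / 16) &&& 0x0F0F
def Hw (w : Nat) : Nat := q3 (q2 (q1 w))

def p1 (x : Nat) : Nat := x - ((x / 2) &&& 0x55555555)
def p2 (x : Nat) : Nat := (x &&& 0x33333333) + ((x / 4) &&& 0x33333333)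
def p3 (x : Nat) : Nat := (x + x / 16) &&& 0x0F0F0F0F
def colN (x : Nat) : Nat := ((p3 (p2 (p1 x)) * 0x1010101) &&& 0xffffffff) / 0x1000000

set_option maxHeartbeats 2000000 in
set_option maxRecDepth 20000 in
theorem byteTbl : ∀ v < 256, Bt v = popc v ∧ Bt v ≤ 8 ∧ r2 (r1 v) ≤ 68 ∧ r2 (r1 v) % 16 ≤ 4 := by
  decide

-- byte-level split lemmas (K = 256)
theorem sb1 (lo hi : Nat) (hlo : lo < 256) :
    ((lo + 256*hi) / 2) &&& 21845 = ((lo/2) &&& 85) + 256*((hi/2) &&& 85) := by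
  have hd : (lo + 256*hi) / 2 = (lo/2 + 128*(hi%2)) + 256*(hi/2) := by omega
  have hs := landSplit (k := 8) (lo/2 + 128*(hi%2)) (hi/2) 85 85 (by omega) (by norm_num)
  norm_num at hs
  have hk1 : (lo/2 + 128*(hi%2)) &&& 85 = (lo/2) &&& 85 := by
    rw [landMod (k := 7) (lo/2 + 128*(hi%2)) 85 (by norm_num),
        landMod (k := 7) (lo/2) 85 (by norm_num)]
    congr 1
    omega
  rw [hd, hs, hk1]

theorem sb2 (lo hi : Nat) (hlo : lo < 256) :
    ((lo + 256*hi) / 4) &&& 13107 = ((lo/4) &&& 51) + 256*((hi/4) &&& 51) := by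
  have hd : (lo + 256*hi) / 4 = (lo/4 + 64*(hi%4)) + 256*(hi/4) := by omega
  have hs := landSplit (k := 8) (lo/4 + 64*(hi%4)) (hi/4) 51 51 (by omega) (by norm_num)
  norm_num at hs
  have hk1 : (lo/4 + 64*(hi%4)) &&& 51 = (lo/4) &&& 51 := by
    rw [landMod (k := 6) (lo/4 + 64*(hi%4)) 51 (by norm_num),
        landMod (k := 6) (lo/4) 51 (by norm_num)]
    congr 1
    omega
  rw [hd, hs, hk1]

theorem sb0 (lo hi : Nat) (hlo : lo < 256) :
    (lo + 256*hi) &&& 13107 = (lo &&& 51) + 256*(hi &&& 51) := by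
  have hs := landSplit (k := 8) lo hi 51 51 (by omega) (by norm_num)
  norm_num at hs
  exact hs

theorem sb3 (lo hi : Nat) (hlo : lo < 256) (hA : lo + lo/16 + 16*(hi%16) < 256) :
    ((lo + 256*hi) + (lo + 256*hi) / 16) &&& 3855
      = ((lo + lo/16) &&& 15) + 256*((hi + hi/16) &&& 15) := by
  have hd : (lo + 256*hi) + (lo + 256*hi) / 16
      = (lo + lo/16 + 16*(hi%16)) + 256*(hi + hi/16) := by omega
  have hs := landSplit (k := 8) (lo + lo/16 + 16*(hi%16)) (hi + hi/16) 15 15 (by omega) (by norm_num)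
  norm_num at hs
  have hk1 : (lo + lo/16 + 16*(hi%16)) &&& 15 = (lo + lo/16) &&& 15 := by
    rw [landMod (k := 4) (lo + lo/16 + 16*(hi%16)) 15 (by norm_num),
        landMod (k := 4) (lo + lo/16) 15 (by norm_num)]
    congr 1
    omega
  rw [hd, hs, hk1]

-- word-level split lemmas (K = 65536)
theorem sw1 (lo hi : Nat) (hlo : lo < 65536) :
    ((lo + 65536*hi) / 2) &&& 1431655765 = ((lo/2) &&& 21845) + 65536*((hi/2) &&& 21845) := by
  have hd : (lo + 65536*hi) / 2 = (lo/2 + 32768*(hi%2)) + 65536*(hi/2) := by omega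
  have hs := landSplit (k := 16) (lo/2 + 32768*(hi%2)) (hi/2) 21845 21845 (by omega) (by norm_num)
  norm_num at hs
  have hk1 : (lo/2 + 32768*(hi%2)) &&& 21845 = (lo/2) &&& 21845 := by
    rw [landMod (k := 15) (lo/2 + 32768*(hi%2)) 21845 (by norm_num),
        landMod (k := 15) (lo/2) 21845 (by norm_num)]
    congr 1
    omega
  rw [hd, hs, hk1]

theorem sw2 (lo hi : Nat) (hlo : lo < 65536) :
    ((lo + 65536*hi) / 4) &&& 858993459 = ((lo/4) &&& 13107) + 65536*((hi/4) &&& 13107) := by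
  have hd : (lo + 65536*hi) / 4 = (lo/4 + 16384*(hi%4)) + 65536*(hi/4) := by omega
  have hs := landSplit (k := 16) (lo/4 + 16384*(hi%4)) (hi/4) 13107 13107 (by omega) (by norm_num)
  norm_num at hs
  have hk1 : (lo/4 + 16384*(hi%4)) &&& 13107 = (lo/4) &&& 13107 := by
    rw [landMod (k := 14) (lo/4 + 16384*(hi%4)) 13107 (by norm_num),
        landMod (k := 14) (lo/4) 13107 (by norm_num)]
    congr 1
    omega
  rw [hd, hs, hk1]

theorem sw0 (lo hi : Nat) (hlo : lo < 65536) :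
    (lo + 65536*hi) &&& 858993459 = (lo &&& 13107) + 65536*(hi &&& 13107) := by
  have hs := landSplit (k := 16) lo hi 13107 13107 (by omega) (by norm_num)
  norm_num at hs
  exact hs

theorem sw3 (lo hi : Nat) (hlo : lo < 65536) (hA : lo + lo/16 + 4096*(hi%16) < 65536) :
    ((lo + 65536*hi) + (lo + 65536*hi) / 16) &&& 252645135
      = ((lo + lo/16) &&& 3855) + 65536*((hi + hi/16) &&& 3855) := by
  have hd : (lo + 65536*hi) + (lo + 65536*hi) / 16
      = (lo + lo/16 + 4096*(hi%16)) + 65536*(hi + hi/16) := by omega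
  have hs := landSplit (k := 16) (lo + lo/16 + 4096*(hi%16)) (hi + hi/16) 3855 3855 (by omega) (by norm_num)
  norm_num at hs
  have hk1 : (lo + lo/16 + 4096*(hi%16)) &&& 3855 = (lo + lo/16) &&& 3855 := by
    rw [landMod (k := 12) (lo + lo/16 + 4096*(hi%16)) 3855 (by norm_num),
        landMod (k := 12) (lo + lo/16) 3855 (by norm_num)]
    congr 1
    omega
  rw [hd, hs, hk1]

-- halfword pipeline = two byte pipelines
theorem Hw_eq (w : Nat) (hw : w < 65536) :
    Hw w = Bt (w % 256) + 256 * Bt (w / 256)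
      ∧ q2 (q1 w) = r2 (r1 (w % 256)) + 256 * r2 (r1 (w / 256)) := by
  set v0 := w % 256 with hv0
  set v1 := w / 256 with hv1
  have hv0lt : v0 < 256 := by omega
  have hv1lt : v1 < 256 := by omega
  have hwsplit : w = v0 + 256*v1 := by omega
  have e1 : q1 w = r1 v0 + 256 * r1 v1 := by
    rw [hwsplit]
    unfold q1 r1
    rw [sb1 v0 v1 hv0lt]
    have b0 : (v0/2) &&& 85 ≤ v0 := le_trans Nat.and_le_left (by omega)
    have b1 : (v1/2) &&& 85 ≤ v1 := le_trans Nat.and_le_left (by omega)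
    omega
  have hr10 : r1 v0 < 256 := by unfold r1; omega
  have e2 : q2 (q1 w) = r2 (r1 v0) + 256 * r2 (r1 v1) := by
    rw [e1]
    unfold q2 r2
    rw [sb0 (r1 v0) (r1 v1) hr10, sb2 (r1 v0) (r1 v1) hr10]
    ring
  obtain ⟨-, -, hb0, hm0⟩ := byteTbl v0 hv0lt
  obtain ⟨-, -, hb1, hm1⟩ := byteTbl v1 hv1lt
  have e3 : q3 (q2 (q1 w)) = r3 (r2 (r1 v0)) + 256 * r3 (r2 (r1 v1)) := by
    rw [e2]
    unfold q3 r3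
    rw [sb3 (r2 (r1 v0)) (r2 (r1 v1)) (by omega) (by omega)]
  exact ⟨e3, e2⟩

-- word pipeline = two halfword pipelines = four byte pipelines, then the multiply gathers bytes
theorem colN_popc_aux (x : Nat) (hx : x < 4294967296) :
    p3 (p2 (p1 x)) = Bt (x % 256) + 256 * Bt (x / 256 % 256)
      + 65536 * Bt (x / 65536 % 256) + 16777216 * Bt (x / 65536 / 256) := by
  set lo := x % 65536 with hlo
  set hi := x / 65536 with hhi
  have hlolt : lo < 65536 := by omega
  have hhilt : hi < 65536 := by omega
  have hxsplit : x = lo + 65536*hi := by omega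
  have e1 : p1 x = q1 lo + 65536 * q1 hi := by
    rw [hxsplit]
    unfold p1 q1
    rw [sw1 lo hi hlolt]
    have b0 : (lo/2) &&& 21845 ≤ lo := le_trans Nat.and_le_left (by omega)
    have b1 : (hi/2) &&& 21845 ≤ hi := le_trans Nat.and_le_left (by omega)
    omega
  have hq1lo : q1 lo < 65536 := by unfold q1; omega
  have e2 : p2 (p1 x) = q2 (q1 lo) + 65536 * q2 (q1 hi) := by
    rw [e1]
    unfold p2 q2
    rw [sw0 (q1 lo) (q1 hi) hq1lo, sw2 (q1 lo) (q1 hi) hq1lo]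
    ring
  obtain ⟨hHlo, hmidlo⟩ := Hw_eq lo hlolt
  obtain ⟨hHhi, hmidhi⟩ := Hw_eq hi hhilt
  obtain ⟨-, -, hblo0, hmlo0⟩ := byteTbl (lo % 256) (by omega)
  obtain ⟨-, -, hblo1, hmlo1⟩ := byteTbl (lo / 256) (by omega)
  obtain ⟨-, -, hbhi0, hmhi0⟩ := byteTbl (hi % 256) (by omega)
  obtain ⟨-, -, hbhi1, hmhi1⟩ := byteTbl (hi / 256) (by omega)
  have e3 : p3 (p2 (p1 x)) = q3 (q2 (q1 lo)) + 65536 * q3 (q2 (q1 hi)) := by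
    rw [e2]
    unfold p3 q3
    rw [sw3 (q2 (q1 lo)) (q2 (q1 hi)) (by omega) (by omega)]
  have hx0 : x % 256 = lo % 256 := by omega
  have hx1 : x / 256 % 256 = lo / 256 := by omega
  have hx2 : x / 65536 % 256 = hi % 256 := by omega
  have hx3 : x / 65536 / 256 = hi / 256 := by omega
  rw [e3]
  unfold Hw at hHlo hHhi
  rw [hHlo, hHhi, hx0, hx1, hx2, hx3]
  ring

theorem popc_split (k : Nat) : ∀ a b : Nat, a < 2^k → popc (a + 2^k*b) = popc a + popc b := by
  induction k with
  | zero =>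
    intro a b ha
    interval_cases a
    simp [popc_zero]
  | succ k IH =>
    intro a b ha
    have e : a + 2^(k+1)*b = a + (2^k*b)*2 := by ring
    have h1 : (a + 2^(k+1)*b) % 2 = a % 2 := by
      rw [e, Nat.add_mul_mod_self_right]
    have h2 : (a + 2^(k+1)*b) / 2 = a/2 + 2^k*b := by
      rw [e, Nat.add_mul_div_right _ _ (by norm_num : (0:Nat) < 2)]
    have ha2 : a / 2 < 2^k := by
      have : (2:Nat)^(k+1) = 2^k * 2 := by ring
      omega
    rw [popc_rec (a + 2^(k+1)*b), h1, h2, IH (a/2) b ha2, popc_rec a]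
    ring

theorem colN_popc (x : Nat) (hx : x < 4294967296) : colN x = popc x := by
  obtain ⟨-, h0b, -, -⟩ := byteTbl (x % 256) (by omega)
  obtain ⟨-, h1b, -, -⟩ := byteTbl (x / 256 % 256) (by omega)
  obtain ⟨-, h2b, -, -⟩ := byteTbl (x / 65536 % 256) (by omega)
  obtain ⟨-, h3b, -, -⟩ := byteTbl (x / 65536 / 256) (by omega)
  obtain ⟨h0e, -, -, -⟩ := byteTbl (x % 256) (by omega)
  obtain ⟨h1e, -, -, -⟩ := byteTbl (x / 256 % 256) (by omega)
  obtain ⟨h2e, -, -, -⟩ := byteTbl (x / 65536 % 256) (by omega)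
  obtain ⟨h3e, -, -, -⟩ := byteTbl (x / 65536 / 256) (by omega)
  set n0 := Bt (x % 256)
  set n1 := Bt (x / 256 % 256)
  set n2 := Bt (x / 65536 % 256)
  set n3 := Bt (x / 65536 / 256)
  have hpipe := colN_popc_aux x hx
  -- the multiply-and-extract step
  have hmul : ((n0 + 256*n1 + 65536*n2 + 16777216*n3) * 16843009) % 4294967296 / 16777216
      = n0+n1+n2+n3 := by
    have hexp : (n0 + 256*n1 + 65536*n2 + 16777216*n3) * 16843009
        = (n0 + 256*(n0+n1) + 65536*(n0+n1+n2) + 16777216*(n0+n1+n2+n3))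
          + 4294967296*((n1+n2+n3) + 256*(n2+n3) + 65536*n3) := by ring
    rw [hexp, Nat.add_mul_mod_self_left,
        Nat.mod_eq_of_lt (by omega : (n0 + 256*(n0+n1) + 65536*(n0+n1+n2) + 16777216*(n0+n1+n2+n3)) < 4294967296)]
    omega
  have hland : ∀ y : Nat, y &&& 4294967295 = y % 4294967296 := by
    intro y
    have h1 : y &&& 4294967295 = (y % 4294967296) &&& 4294967295 := by
      have h := landMod (k := 32) y 4294967295 (by norm_num)
      norm_num at h
      exact h
    rw [h1]
    apply Nat.eq_of_testBit_eq
    intro i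
    rw [Nat.testBit_land]
    by_cases h : i < 32
    · have ht : (4294967295 : Nat).testBit i = true := by
        rw [(by norm_num : (4294967295:Nat) = 2^32 - 1), Nat.testBit_two_pow_sub_one]
        simpa using h
      simp [ht]
    · have hf : (y % 4294967296).testBit i = false := by
        apply Nat.testBit_eq_false_of_lt
        calc y % 4294967296 < 4294967296 := Nat.mod_lt _ (by norm_num)
          _ ≤ 2^i := by
              have : (4294967296:Nat) = 2^32 := by norm_num
              rw [this]
              exact Nat.pow_le_pow_right (by norm_num) (by omega)
      simp [hf]
  -- popc splits over the four bytes
  have hps : popc x = popc (x % 256) + popc (x / 256 % 256) + popc (x / 65536 % 256) + popc (x / 65536 / 256) := by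
    have s16 := popc_split 16 (x % 65536) (x / 65536) (by omega)
    norm_num at s16
    have slo := popc_split 8 (x % 256) (x / 256 % 256) (by omega)
    norm_num at slo
    have shi := popc_split 8 (x / 65536 % 256) (x / 65536 / 256) (by omega)
    norm_num at shi
    have h16 : popc x = popc (x % 65536) + popc (x / 65536) := by
      rw [← s16]; congr 1; omega
    have hlo : popc (x % 65536) = popc (x % 256) + popc (x / 256 % 256) := by
      rw [← slo]; congr 1; omega
    have hhi : popc (x / 65536) = popc (x / 65536 % 256) + popc (x / 65536 / 256) := by
      rw [← shi]; congr 1; omega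
    rw [h16, hlo, hhi]
    ring
  unfold colN
  rw [hpipe, hland, hmul, hps, ← h0e, ← h1e, ← h2e, ← h3e]

-- cast bridge: the Int-valued port helper computes colN on Nat inputs
theorem colisoes_cast (v : Nat) : colisoes (v : Int) = (colN v : Int) := by
  simp only [colisoes, colN]
  have c1 : PySem.Int.band ((v:Int) >>> (1:Nat)) 0x55555555 = (((v/2) &&& 0x55555555 : Nat) : Int) := by
    rw [natCast_shiftRight]
    rw [Nat.shiftRight_eq_div_pow, pow_one]
    exact_mod_cast PySem.Int.band_natCast (v/2) 0x55555555
  rw [c1]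
  have hle1 : (v/2) &&& 0x55555555 ≤ v := le_trans Nat.and_le_left (by omega)
  have c2 : (v:Int) - (((v/2) &&& 0x55555555 : Nat) : Int) = ((p1 v : Nat) : Int) := by
    unfold p1; push_cast [Nat.cast_sub hle1]; ring
  rw [c2]
  have c3 : PySem.Int.band ((p1 v : Nat) : Int) 0x33333333 = (((p1 v) &&& 0x33333333 : Nat) : Int) := by
    exact_mod_cast PySem.Int.band_natCast (p1 v) 0x33333333
  have c4 : PySem.Int.band (((p1 v : Nat) : Int) >>> (2:Nat)) 0x33333333
      = (((p1 v / 4) &&& 0x33333333 : Nat) : Int) := by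
    rw [natCast_shiftRight]
    rw [Nat.shiftRight_eq_div_pow]
    norm_num
    exact_mod_cast PySem.Int.band_natCast (p1 v / 4) 0x33333333
  rw [c3, c4]
  have c5 : (((p1 v) &&& 0x33333333 : Nat) : Int) + (((p1 v / 4) &&& 0x33333333 : Nat) : Int)
      = ((p2 (p1 v) : Nat) : Int) := by
    unfold p2; push_cast; ring
  rw [c5]
  set w := p2 (p1 v) with hw
  have c6 : ((w : Nat) : Int) + ((w : Nat) : Int) >>> (4:Nat) = (((w + w/16) : Nat) : Int) := by
    rw [natCast_shiftRight, Nat.shiftRight_eq_div_pow]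
    norm_num
  rw [c6]
  have c7 : PySem.Int.band (((w + w/16 : Nat)) : Int) 0xF0F0F0F
      = ((((w + w/16) &&& 0xF0F0F0F : Nat)) : Int) := by
    exact_mod_cast PySem.Int.band_natCast (w + w/16) 0xF0F0F0F
  rw [c7]
  have c8 : ((((w + w/16) &&& 0xF0F0F0F : Nat)) : Int) * 0x1010101
      = ((((w + w/16) &&& 0xF0F0F0F) * 0x1010101 : Nat) : Int) := by
    push_cast; ring
  rw [c8]
  have c9 : PySem.Int.band (((((w + w/16) &&& 0xF0F0F0F) * 0x1010101 : Nat)) : Int) 0xffffffff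
      = (((((w + w/16) &&& 0xF0F0F0F) * 0x1010101) &&& 0xffffffff : Nat) : Int) := by
    exact_mod_cast PySem.Int.band_natCast (((w + w/16) &&& 0xF0F0F0F) * 0x1010101) 0xffffffff
  rw [c9, natCast_shiftRight, Nat.shiftRight_eq_div_pow]
  unfold p3
  norm_num

-- ---- the two loop summaries ----
def fa (p m : Nat) : Nat := if p = 0 then 0 else popc (p &&& m) + fa (p/2) m
termination_by p
decreasing_by omega

def gb (n m j : Nat) : Nat :=
  if m = 0 then 0 else (if m % 2 = 1 then popc (n / 2^(j+1)) else 0) + gb n (m/2) (j+1)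
termination_by m
decreasing_by omega

theorem fa_zero : ∀ p, fa p 0 = 0 := by
  intro p
  induction p using Nat.strong_induction_on with
  | _ p IH =>
    rw [fa]
    rcases Nat.eq_zero_or_pos p with h | h
    · simp [h]
    · rw [if_neg (by omega)]
      rw [IH (p/2) (by omega)]
      simp [Nat.and_zero, popc_zero]

theorem popc_land_rec (u v : Nat) :
    popc (u &&& v) = (u % 2) * (v % 2) + popc ((u/2) &&& (v/2)) := by
  rw [popc_rec (u &&& v), land_mod2, land_div2]

theorem fa_rec : ∀ p m, fa p m = (m % 2) * popc p + fa (p/2) (m/2) := by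
  intro p
  induction p using Nat.strong_induction_on with
  | _ p IH =>
    intro m
    rcases Nat.eq_zero_or_pos p with h | h
    · subst h
      simp [fa, popc_zero]
    rcases Nat.eq_zero_or_pos (p/2) with h2 | h2
    · have hp1 : p = 1 := by omega
      subst hp1
      have l : fa 1 m = popc (1 &&& m) := by
        rw [show fa 1 m = popc (1 &&& m) + fa (1/2) m from by rw [fa]; simp]
        rw [show fa (1/2) m = 0 from by rw [fa]; simp]
        omega
      have r : fa (1/2) (m/2) = 0 := by rw [fa]; simp
      rw [l, r]
      rw [Nat.land_comm, Nat.and_one_is_mod]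
      have hp : popc 1 = 1 := by decide
      rcases Nat.mod_two_eq_zero_or_one m with hm | hm <;>
        simp [hm, hp, popc_zero]
    · rw [show fa p m = popc (p &&& m) + fa (p/2) m from by rw [fa, if_neg (by omega)]]
      rw [IH (p/2) (by omega) m]
      rw [popc_land_rec p m]
      rw [show fa (p/2) (m/2) = popc ((p/2) &&& (m/2)) + fa (p/2/2) (m/2) from by
        rw [fa, if_neg (by omega)]]
      have hpr := popc_rec p
      rcases Nat.mod_two_eq_zero_or_one m with hm | hm <;> rw [hm] <;> ring_nf <;> omega

theorem gb_shift (n : Nat) : ∀ m j, gb n m (j+1) = gb (n/2) m j := by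
  intro m
  induction m using Nat.strong_induction_on with
  | _ m IH =>
    intro j
    rcases Nat.eq_zero_or_pos m with h | h
    · subst h
      rw [gb]
      rw [show gb (n/2) 0 j = 0 from by rw [gb]; simp]
      simp
    · rw [show gb n m (j+1)
          = (if m % 2 = 1 then popc (n / 2^(j+1+1)) else 0) + gb n (m/2) (j+1+1) from by
        rw [gb, if_neg (by omega)]]
      rw [show gb (n/2) m j
          = (if m % 2 = 1 then popc ((n/2) / 2^(j+1)) else 0) + gb (n/2) (m/2) (j+1) from by
        rw [gb, if_neg (by omega)]]
      rw [IH (m/2) (by omega) (j+1)]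
      have e : n / 2^(j+1+1) = (n/2) / 2^(j+1) := by
        rw [Nat.div_div_eq_div_mul, ← pow_succ']
      rw [e]

theorem fa_gb : ∀ m n, fa (n/2) m = gb n m 0 := by
  intro m
  induction m using Nat.strong_induction_on with
  | _ m IH =>
    intro n
    rcases Nat.eq_zero_or_pos m with h | h
    · subst h
      rw [fa_zero, gb]
      simp
    · rw [gb, if_neg (by omega), gb_shift n (m/2) 0, ← IH (m/2) (by omega) (n/2)]
      rw [fa_rec (n/2) m]
      have e1 : n / 2^(0+1) = n/2 := by norm_num
      have e2 : n/2/2 = n/2/2 := rfl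
      rw [e1]
      rcases Nat.mod_two_eq_zero_or_one m with hm | hm <;> simp [hm]

-- loop A computes fa of (masc1 >> 1) and masc2's low 32 bits
theorem loopA_eq (masc2 : Int) (m2' : Nat)
    (hm2 : (PySem.Int.band masc2 0xffffffff).toNat = m2') :
    ∀ p : Nat, p < 4294967296 → ∀ t : Int, loopA (p : Int) masc2 t = t + (fa p m2' : Int) := by
  intro p
  induction p using Nat.strong_induction_on with
  | _ p IH =>
    intro hp t
    rw [loopA]
    rcases Nat.eq_zero_or_pos p with h | h
    · subst h
      rw [dif_pos (by norm_num)]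
      rw [fa]
      simp
    · have hpos : ¬ ((p:Int) ≤ 0) := by
        have : (0:Int) < (p:Int) := by exact_mod_cast h
        omega
      rw [dif_neg hpos]
      have hband : PySem.Int.band (p : Int) masc2 = ((p &&& m2' : Nat) : Int) := by
        rw [band32 masc2 p (by omega), hm2]
      rw [hband, colisoes_cast, colN_popc (p &&& m2') (lt_of_le_of_lt Nat.and_le_left (by omega))]
      rw [natCast_shiftRight, Nat.shiftRight_eq_div_pow, pow_one]
      rw [IH (p/2) (by omega) (by omega) (t + ((popc (p &&& m2') : Nat) : Int))]
      rw [show fa p m2' = popc (p &&& m2') + fa (p/2) m2' from by rw [fa, if_neg (by omega)]]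
      push_cast
      ring

-- loop B computes gb of masc1 and the masked masc2
theorem loopB_eq (n : Nat) : ∀ (m : Nat) (j : Nat) (t : Int),
    loopB (n : Int) ((m : Nat) : Int) j t = t + (gb n m j : Int) := by
  intro m
  induction m using Nat.strong_induction_on with
  | _ m IH =>
    intro j t
    rw [loopB]
    rcases Nat.eq_zero_or_pos m with h | h
    · subst h
      rw [dif_pos (by norm_num)]
      rw [gb]
      simp
    · have hpos : ¬ ((m:Int) ≤ 0) := by
        have : (0:Int) < (m:Int) := by exact_mod_cast h
        omega
      rw [dif_neg hpos]
      have hband : PySem.Int.band ((m : Nat) : Int) 1 = ((m % 2 : Nat) : Int) := by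
        have hb := PySem.Int.band_natCast m 1
        rw [Nat.and_one_is_mod] at hb
        exact_mod_cast hb
      have hbc : (PySem.Int.bitCount ((n:Int) >>> (j+1)) : Int) = ((popc (n / 2^(j+1)) : Nat) : Int) := by
        rw [natCast_shiftRight, Nat.shiftRight_eq_div_pow]
        rfl
      have hm2shift : ((m:Int) >>> (1:Nat)) = (((m/2 : Nat)) : Int) := by
        rw [natCast_shiftRight m 1, Nat.shiftRight_eq_div_pow, pow_one]
      rw [hm2shift]
      rw [IH (m/2) (by omega) (j+1) _]
      rw [show gb n m j = (if m % 2 = 1 then popc (n / 2^(j+1)) else 0) + gb n (m/2) (j+1) from by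
        rw [gb, if_neg (by omega)]]
      simp only [hband, hbc]
      rcases Nat.mod_two_eq_zero_or_one m with hm | hm
      · rw [hm]
        norm_num
      · rw [hm]
        norm_num
        push_cast
        ring

-- ===== VERDICT (by name: the statement is the Claim_ definition above) =====
theorem reordenacanonica_spec : Claim_equal_reordenacanonica := by
  intro masc1 masc2 hdom hpre
  unfold Spec_reordenacanonica
  obtain ⟨n, rfl⟩ := Int.eq_ofNat_of_zero_le hpre
  have hn : n ≤ 2147483648 := by
    unfold Dom_reordenacanonica pvDomInt at hdom
    simp only [Bool.and_eq_true, decide_eq_true_eq] at hdom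
    exact_mod_cast hdom.1.2
  -- the masked masc2 as a Nat
  set m2' := (PySem.Int.band masc2 0xffffffff).toNat with hm2
  have hm2nonneg : 0 ≤ PySem.Int.band masc2 0xffffffff := by
    rw [PySem.Int.band_comm]
    exact PySem.Int.band_nonneg_of_nonneg_left masc2 (by norm_num)
  have hm2cast : PySem.Int.band masc2 0xffffffff = (m2' : Int) := by
    rw [hm2, Int.toNat_of_nonneg hm2nonneg]
  -- A's accumulator
  unfold reordenacanonica
  rw [natCast_shiftRight, Nat.shiftRight_eq_div_pow, pow_one]
  rw [loopA_eq masc2 m2' rfl (n/2) (by omega) 0]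
  -- B's accumulator
  unfold reordenacanonica_alt
  rw [hm2cast, loopB_eq n m2' 0 0]
  rw [fa_gb m2' n]
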